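-- pv_equiv track=rewrite | github.com/darcy5d/trav_daddy | src/utils/default_elo.py | _is_second_division
-- ===== SOURCE A (Python) =====
-- def _is_second_division(name: str) -> bool:
--     """Check if series name suggests second division / lower tier."""
--     if not name:
--         return False
--     n = name.lower()
--     return any(
--         x in n
--         for x in [
--             "second division",
--             "2nd division",
--             "division 2",
--             "div 2",
--             "division two",
--             "second div",
--             "2nd div",
--         ]
--     )
-- ===== SOURCE B (Python) =====
-- _KEYWORDS = (
--     "second division",
--     "2nd division",
--     "division 2",
--     "div 2",
--     "division two",
--     "second div",
--     "2nd div",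
-- )
--
--
-- def _is_second_division(name: str) -> bool:
--     """Single left-to-right scan: at each position, test whether any keyword starts there."""
--     if not name:
--         return False
--     n = name.lower()
--     return any(n.startswith(k, i) for i in range(len(n)) for k in _KEYWORDS)
-- ===== Notes on version B (the rewrite author's own statement) =====
-- stated objective: alternative
-- what changed: A runs seven independent whole-string substring searches, one per keyword; B makes a single left-to-right scan over the positions of the lowered string and at each position tests whether any keyword starts there (startswith with an offset), i.e. a multi-pattern scan in one traversal.
import Mathlib
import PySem

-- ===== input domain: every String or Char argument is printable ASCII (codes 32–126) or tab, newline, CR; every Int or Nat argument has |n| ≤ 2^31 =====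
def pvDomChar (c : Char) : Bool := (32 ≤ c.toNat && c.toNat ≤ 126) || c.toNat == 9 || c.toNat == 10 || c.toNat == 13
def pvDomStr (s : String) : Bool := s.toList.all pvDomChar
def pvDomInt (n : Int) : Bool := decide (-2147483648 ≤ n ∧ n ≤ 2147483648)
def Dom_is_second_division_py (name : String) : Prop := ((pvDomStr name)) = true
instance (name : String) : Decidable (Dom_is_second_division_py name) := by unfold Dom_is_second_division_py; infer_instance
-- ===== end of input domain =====

-- ===== PORT A =====
-- B replaces A's seven independent substring searches by one left-to-right scan that
-- tests every keyword at each position (objective: alternative, same cost).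
def is_second_division_py (name : String) : Bool :=
  if name == "" then false
  else
    let n := PySem.Str.lower name
    [ "second division", "2nd division", "division 2", "div 2",
      "division two", "second div", "2nd div" ].any (fun x => PySem.Str.isIn x n)

-- ===== PORT B =====
def pvKeywords : List (List Char) :=
  [ "second division".toList, "2nd division".toList, "division 2".toList, "div 2".toList,
    "division two".toList, "second div".toList, "2nd div".toList ]

-- n.startswith(k, i) with 0 <= i < len(n) is exactly: k is a prefix of the suffix n[i:]
def is_second_division_py_alt (name : String) : Bool :=
  if name == "" then false
  else
    let n := (PySem.Str.lower name).toList
    (List.range n.length).any (fun i =>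
      pvKeywords.any (fun k => PySem.Chars.startswith (n.drop i) k))

-- ===== PRECONDITION & SPEC =====
def Spec_is_second_division_py (name : String) (out : Bool) : Prop := out = is_second_division_py_alt name
instance (name : String) (out : Bool) : Decidable (Spec_is_second_division_py name out) := by unfold Spec_is_second_division_py; infer_instance

-- ===== CLAIM (what is proved, stated in full; the proofs are below) =====
def Claim_equal_is_second_division_py : Prop := ∀ (name : String), Dom_is_second_division_py name → Spec_is_second_division_py name (is_second_division_py name)

-- ===== LEMMAS AND PROOFS =====

-- a family of nonempty patterns occurs somewhere in l iff some position of l starts one of them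
lemma pv_scan_eq (K : List (List Char)) (hK : ∀ k ∈ K, k ≠ []) (l : List Char) :
    K.any (fun k => PySem.Chars.isIn k l) =
    (List.range l.length).any (fun i =>
      K.any (fun k => PySem.Chars.startswith (l.drop i) k)) := by
  rw [Bool.eq_iff_iff]
  simp only [List.any_eq_true, List.mem_range, PySem.Chars.startswith_iff]
  constructor
  · rintro ⟨k, hk, hin⟩
    obtain ⟨j, hj⟩ := (PySem.Chars.exists_prefix_drop_iff_isIn k l).mpr hin
    refine ⟨j, ?_, k, hk, hj⟩
    by_contra hlen
    have : l.drop j = [] := List.drop_eq_nil_of_le (by omega)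
    rw [this] at hj
    exact hK k hk (List.prefix_nil.mp hj)
  · rintro ⟨i, _, k, hk, hpref⟩
    exact ⟨k, hk, (PySem.Chars.exists_prefix_drop_iff_isIn k l).mp ⟨i, hpref⟩⟩

-- ===== VERDICT (by name: the statement is the Claim_ definition above) =====
theorem is_second_division_py_spec : Claim_equal_is_second_division_py := by
  intro name _
  unfold Spec_is_second_division_py is_second_division_py is_second_division_py_alt
  by_cases h : name == ""
  · simp [h]
  · simp only [h]
    have := pv_scan_eq pvKeywords (by decide) (PySem.Str.lower name).toList
    simpa [pvKeywords] using this
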